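-- pv_equiv track=rewrite | github.com/higurin/read_musicXML | read_musicXML.py | pitch_highest
-- ===== SOURCE A (Python) =====
-- def pitch_highest(part):
--     before=part[0]
--     pitch_highest_list=[]
--     for p in part:
--         if before[0] != p[0]:
--             pitch_highest_list.append(before)
--         before = p
--     pitch_highest_list.append(before)
--
--     return pitch_highest_list
-- ===== SOURCE B (Python) =====
-- def pitch_highest(part):
--     # Stage 1: partition part into maximal runs of equal first field.
--     groups = []
--     for p in part:
--         if groups and groups[-1][-1][0] == p[0]:
--             groups[-1].append(p)
--         else:
--             groups.append([p])
--     # Stage 2: the answer is the last element of each run.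
--     return [g[-1] for g in groups]
-- ===== Notes on version B (the rewrite author's own statement) =====
-- stated objective: alternative
-- what changed: B is staged: it first partitions the list into maximal runs of equal first field (a list of groups, extending the last group or opening a new one), then maps each group to its last element, instead of A's single pass that tracks a 'before' element and appends it at each change.
import Mathlib
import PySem

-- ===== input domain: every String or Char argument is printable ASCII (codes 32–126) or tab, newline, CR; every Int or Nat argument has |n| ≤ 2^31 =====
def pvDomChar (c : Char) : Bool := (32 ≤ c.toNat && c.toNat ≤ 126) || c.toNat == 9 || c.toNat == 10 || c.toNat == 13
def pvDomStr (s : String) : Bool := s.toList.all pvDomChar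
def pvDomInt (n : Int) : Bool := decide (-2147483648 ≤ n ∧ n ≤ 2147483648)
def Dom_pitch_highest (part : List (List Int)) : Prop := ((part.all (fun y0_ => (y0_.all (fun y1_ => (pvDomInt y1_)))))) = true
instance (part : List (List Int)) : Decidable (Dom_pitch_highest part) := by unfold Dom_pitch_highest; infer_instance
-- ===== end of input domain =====

-- B restructures A's stateful 'before' loop into two stages: partition into maximal runs of
-- equal first field, then map each run to its last element (objective: alternative).

-- ===== PORT A =====
-- Literal port of A: before = part[0]; fold over part carrying (pitch_highest_list, before).
-- Under Pre_ the list and all its elements are nonempty, so the headD defaults are never used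
-- (Python raises IndexError exactly where they would be, and Pre_ excludes those inputs).
def pitch_highest (part : List (List Int)) : List (List Int) :=
  let before := part.headD []
  let st := part.foldl
    (fun (st : List (List Int) × List Int) p =>
      (if st.2.headD 0 ≠ p.headD 0 then st.1 ++ [st.2] else st.1, p))
    (([] : List (List Int)), before)
  st.1 ++ [st.2]

-- ===== PORT B =====
-- Literal port of B's loop body: 'if groups and groups[-1][-1][0] == p[0]' extends the last group,
-- else opens a new group. getLastD defaults are never used inside Pre_ (all elements nonempty).
def pvStep (groups : List (List (List Int))) (p : List Int) : List (List (List Int)) :=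
  if groups ≠ [] ∧ ((groups.getLastD []).getLastD []).headD 0 = p.headD 0 then
    groups.dropLast ++ [groups.getLastD [] ++ [p]]
  else
    groups ++ [[p]]

-- Stage 1: fold the grouping loop; Stage 2: [g[-1] for g in groups].
def pitch_highest_alt (part : List (List Int)) : List (List Int) :=
  (part.foldl pvStep []).map (fun g => g.getLastD [])

-- ===== PRECONDITION & SPEC =====
-- A raises IndexError on the empty list (part[0]) and whenever some element is the empty list
-- (before[0] / p[0]); exactly those inputs are excluded.
def Pre_pitch_highest (part : List (List Int)) : Prop :=
  part ≠ [] ∧ ∀ p ∈ part, p ≠ []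
instance (part : List (List Int)) : Decidable (Pre_pitch_highest part) := by
  unfold Pre_pitch_highest; infer_instance

def pvWitness_pitch_highest : List (List Int) := [[60], [60, 2], [62]]

def Spec_pitch_highest (part : List (List Int)) (out : List (List Int)) : Prop := out = pitch_highest_alt part
instance (part : List (List Int)) (out : List (List Int)) : Decidable (Spec_pitch_highest part out) := by unfold Spec_pitch_highest; infer_instance

-- ===== CLAIM (what is proved, stated in full; the proofs are below) =====
def Claim_equal_pitch_highest : Prop := ∀ (part : List (List Int)), Dom_pitch_highest part → Pre_pitch_highest part → Spec_pitch_highest part (pitch_highest part)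

-- ===== LEMMAS AND PROOFS =====

-- A's loop body, as structural recursion on the remaining list with the 'before' state.
def pvGo (b : List Int) : List (List Int) → List (List Int)
  | [] => [b]
  | p :: ps => (if b.headD 0 ≠ p.headD 0 then [b] else []) ++ pvGo p ps

lemma pv_foldl (l : List (List Int)) : ∀ (acc : List (List Int)) (b : List Int),
    (l.foldl
      (fun (st : List (List Int) × List Int) p =>
        (if st.2.headD 0 ≠ p.headD 0 then st.1 ++ [st.2] else st.1, p))
      (acc, b)).1 ++
    (l.foldl
      (fun (st : List (List Int) × List Int) p =>
        (if st.2.headD 0 ≠ p.headD 0 then st.1 ++ [st.2] else st.1, p))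
      (acc, b)).2 :: [] = acc ++ pvGo b l := by
  induction l with
  | nil => intro acc b; simp [pvGo]
  | cons p ps ih =>
    intro acc b
    simp only [List.foldl_cons, pvGo]
    by_cases h : b.headD 0 ≠ p.headD 0
    · rw [if_pos h, ih, if_pos h]; simp
    · rw [if_neg h, ih, if_neg h]; simp

-- B's grouping fold, characterised against pvGo: with the groups so far split as gs ++ [g],
-- the final per-group lasts are gs's lasts followed by pvGo on g's last.
lemma pv_fold_groups (l : List (List Int)) : ∀ (gs : List (List (List Int))) (g : List (List Int)),
    ((l.foldl pvStep (gs ++ [g])).map (fun g => g.getLastD [])) =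
      gs.map (fun g => g.getLastD []) ++ pvGo (g.getLastD []) l := by
  induction l with
  | nil => intro gs g; simp [pvGo]
  | cons p ps ih =>
    intro gs g
    rw [List.foldl_cons]
    by_cases h : (g.getLastD []).headD 0 = p.headD 0
    · have hstep : pvStep (gs ++ [g]) p = gs ++ [g ++ [p]] := by
        unfold pvStep
        rw [if_pos ⟨by simp, by simpa using h⟩]
        simp
      rw [hstep, ih]
      have hl : (g ++ [p]).getLastD ([] : List Int) = p := by simp
      rw [hl]
      have hu : pvGo (g.getLastD []) (p :: ps) =
          (if (g.getLastD []).headD 0 ≠ p.headD 0 then [g.getLastD []] else []) ++ pvGo p ps := rfl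
      rw [hu, if_neg (fun hc => hc h), List.nil_append]
    · have hstep : pvStep (gs ++ [g]) p = (gs ++ [g]) ++ [[p]] := by
        unfold pvStep
        rw [if_neg ?_]
        simp only [List.getLastD_concat]
        exact fun hc => h hc.2
      rw [hstep, ih]
      have hu : pvGo (g.getLastD []) (p :: ps) =
          (if (g.getLastD []).headD 0 ≠ p.headD 0 then [g.getLastD []] else []) ++ pvGo p ps := rfl
      rw [hu, if_pos h]
      simp

-- ===== VERDICT (by name: the statement is the Claim_ definition above) =====
theorem pitch_highest_spec : Claim_equal_pitch_highest := by
  intro part _ hpre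
  obtain ⟨hne, -⟩ := hpre
  obtain ⟨h, t, rfl⟩ := List.exists_cons_of_ne_nil hne
  show pitch_highest (h :: t) = pitch_highest_alt (h :: t)
  unfold pitch_highest pitch_highest_alt
  simp only [List.headD_cons, List.foldl_cons]
  rw [pv_foldl, List.nil_append]
  have hstep0 : pvStep [] h = [] ++ [[h]] := by
    unfold pvStep
    rw [if_neg (by simp)]
  rw [hstep0, pv_fold_groups]
  simp
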